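-- pv_equiv track=rewrite | github.com/JoJaJones/AoC2020 | Day6/day_solution.py | part_two
-- ===== SOURCE A (Python) =====
-- def part_two(data):
--     count = 0
--     for group in data:
--         unanimouses = set([char for char in group[0]])
--         for idx in range(1, len(group)):
--             unanimouses = unanimouses.intersection(set([char for char in group[idx]]))
--
--         count += len(unanimouses)
--
--     return count
-- ===== SOURCE B (Python) =====
-- def part_two(data):
--     total = 0
--     for group in data:
--         freq = {}
--         for member in group:
--             for ch in set(member):
--                 freq[ch] = freq.get(ch, 0) + 1
--         n = len(group)
--         total += sum(1 for c in freq.values() if c == n)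
--     return total
-- ===== Notes on version B (the rewrite author's own statement) =====
-- stated objective: idiomatic
-- what changed: B replaces A's shrinking set-intersection loop by a per-group frequency table over each member's distinct characters, counting the characters whose frequency equals the group size.
-- outside the precondition, e.g. on part_two([[]]): A raises IndexError, B returns 0
import Mathlib
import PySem

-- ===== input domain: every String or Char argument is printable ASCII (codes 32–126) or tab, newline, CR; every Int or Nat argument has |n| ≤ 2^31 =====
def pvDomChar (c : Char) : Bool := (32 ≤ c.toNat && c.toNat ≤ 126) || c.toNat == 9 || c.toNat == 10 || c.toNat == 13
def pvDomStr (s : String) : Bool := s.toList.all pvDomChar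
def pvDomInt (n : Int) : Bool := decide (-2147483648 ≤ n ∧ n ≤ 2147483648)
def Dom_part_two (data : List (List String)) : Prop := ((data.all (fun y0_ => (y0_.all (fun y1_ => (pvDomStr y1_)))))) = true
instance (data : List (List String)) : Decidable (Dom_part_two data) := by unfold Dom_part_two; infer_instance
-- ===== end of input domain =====

-- B replaces A's shrinking intersection set with one per-group frequency table
-- (distinct chars per member), counting characters whose frequency equals the
-- group size (objective: idiomatic counting; same value on every nonempty group).

-- ===== PORT A =====
def part_two (data : List (List String)) : Int :=
  data.foldl (fun count group =>
    let unan0 : PySem.Set Char := PySem.Set.ofList (PySem.List.pyGetD group 0 "").toList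
    let unan : PySem.Set Char :=
      (PySem.List.pyRange 1 (group.length : Int) 1).foldl
        (fun u idx => PySem.Set.inter u (PySem.Set.ofList (PySem.List.pyGetD group idx "").toList))
        unan0
    count + PySem.Set.len unan) 0

-- ===== PORT B =====
def part_two_alt (data : List (List String)) : Int :=
  data.foldl (fun total group =>
    let freq : PySem.Dict Char Int :=
      group.foldl
        (fun d member =>
          (PySem.Set.ofList member.toList).foldl (fun d ch => d.modify ch 0 (· + 1)) d)
        PySem.Dict.empty
    let n : Int := (group.length : Int)
    total + ((freq.values.countP (fun v => v == n) : Nat) : Int)) 0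

-- ===== PRECONDITION & SPEC =====
-- Pre_ excludes inputs containing an empty group, on which A raises IndexError at group[0].
def Pre_part_two (data : List (List String)) : Prop := ∀ g ∈ data, g ≠ []
instance (data : List (List String)) : Decidable (Pre_part_two data) := by unfold Pre_part_two; infer_instance
def pvWitness_part_two : List (List String) := [["ab", "bc"], ["x"]]

def Spec_part_two (data : List (List String)) (out : Int) : Prop := out = part_two_alt data
instance (data : List (List String)) (out : Int) : Decidable (Spec_part_two data out) := by unfold Spec_part_two; infer_instance

-- ===== CLAIM (what is proved, stated in full; the proofs are below) =====
def Claim_equal_part_two : Prop := ∀ (data : List (List String)), Dom_part_two data → Pre_part_two data → Spec_part_two data (part_two data)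

-- ===== LEMMAS AND PROOFS =====

-- A's intersection loop is a filter of the initial set by membership in all remaining members.
theorem foldl_inter_eq_filter (rest : List String) (u0 : PySem.Set Char) :
    rest.foldl (fun u s => PySem.Set.inter u (PySem.Set.ofList s.toList)) u0
      = u0.filter (fun c => rest.all (fun s => decide (c ∈ s.toList))) := by
  induction rest generalizing u0 with
  | nil => simp
  | cons s rest ih =>
    rw [List.foldl_cons, ih]
    simp only [PySem.Set.inter, List.filter_filter]
    congr 1
    funext c
    simp [PySem.Set.contains, PySem.Set.mem_ofList, List.all_cons, Bool.and_comm]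

-- B's nested loop over a group is the Counter of the flattened distinct-chars list.
theorem freq_eq_counter (group : List String) :
    group.foldl
        (fun d member =>
          (PySem.Set.ofList member.toList).foldl (fun d ch => d.modify ch 0 (· + 1)) d)
        PySem.Dict.empty
      = PySem.Dict.counter (group.flatMap (fun m => PySem.Set.ofList m.toList)) := by
  rw [PySem.Dict.counter_eq_foldl]
  generalize (PySem.Dict.empty : PySem.Dict Char Int) = d
  induction group generalizing d with
  | nil => simp
  | cons m rest ih => simp [List.foldl_append, ih]

-- count of a char in the flattened distinct-chars list = number of members containing it
theorem count_flatMap_eq_countP (group : List String) (c : Char) :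
    (group.flatMap (fun m => PySem.Set.ofList m.toList)).count c
      = group.countP (fun m => decide (c ∈ m.toList)) := by
  induction group with
  | nil => rfl
  | cons m rest ih =>
    simp only [List.flatMap_cons, List.count_append, List.countP_cons, ih]
    by_cases h : c ∈ m.toList
    · rw [List.count_eq_one_of_mem (PySem.Set.nodup_ofList _) ((PySem.Set.mem_ofList _ _).2 h)]
      simp [h, Nat.add_comm]
    · rw [List.count_eq_zero.2 (fun hc => h ((PySem.Set.mem_ofList _ _).1 hc))]
      simp [h]

-- per-group equality of the two contributions, for a nonempty group
theorem group_contrib_eq (g : String) (rest : List String) :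
    PySem.Set.len
        ((PySem.List.pyRange 1 ((g :: rest).length : Int) 1).foldl
          (fun u idx => PySem.Set.inter u (PySem.Set.ofList (PySem.List.pyGetD (g :: rest) idx "").toList))
          (PySem.Set.ofList (PySem.List.pyGetD (g :: rest) 0 "").toList))
      = (((PySem.Dict.counter ((g :: rest).flatMap (fun m => PySem.Set.ofList m.toList))).values.countP
            (fun v => v == ((g :: rest).length : Int)) : Nat) : Int) := by
  have h0 : PySem.List.pyGetD (g :: rest) 0 "" = g := by simp [pysem]
  rw [h0, PySem.List.foldl_pyRange_pyGetD' (g :: rest) ""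
        (fun u s => PySem.Set.inter u (PySem.Set.ofList s.toList))
        (PySem.Set.ofList g.toList) (by norm_num : (0:Int) ≤ 1)]
  simp only [Int.toNat_one, List.drop_succ_cons, List.drop_zero]
  rw [foldl_inter_eq_filter]
  -- rewrite the RHS count through items_counter and countP_map
  rw [PySem.Dict.values, PySem.Dict.items_counter, List.countP_map, List.countP_map]
  set L := (g :: rest).flatMap (fun m => PySem.Set.ofList m.toList) with hL
  -- both sides as cards of filtered finsets over Nodup lists
  have hlen : ∀ (l : List Char) (p : Char → Bool), l.Nodup →
      (l.filter p).length = (l.toFinset.filter (fun c => p c = true)).card := by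
    intro l p hnd
    rw [← List.toFinset_filter]
    exact (List.toFinset_card_of_nodup (hnd.filter p)).symm
  have hcount : ∀ (p : Char → Bool) (l : List Char), List.countP p l = (List.filter p l).length :=
    fun p l => List.countP_eq_length_filter
  unfold PySem.Set.len
  rw [hlen _ _ (PySem.Set.nodup_ofList g.toList), hcount, hlen _ _ (PySem.Set.nodup_ofList L)]
  congr 1
  apply congrArg
  apply Finset.ext
  intro c
  simp only [Finset.mem_filter, List.mem_toFinset, PySem.Set.mem_ofList, List.all_eq_true,
    decide_eq_true_eq, Function.comp, beq_iff_eq]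
  have hcntP : L.count c = (g :: rest).countP (fun m => decide (c ∈ m.toList)) := by
    rw [hL]; exact count_flatMap_eq_countP _ c
  constructor
  · rintro ⟨hg, hall⟩
    have hmem : ∀ m ∈ g :: rest, c ∈ m.toList := by
      intro m hm
      rcases List.mem_cons.1 hm with hm | hm
      · exact hm ▸ hg
      · exact hall m hm
    refine ⟨?_, ?_⟩
    · rw [hL]; exact List.mem_flatMap.2 ⟨g, List.mem_cons_self, (PySem.Set.mem_ofList _ _).2 hg⟩
    · have : L.count c = (g :: rest).length := by
        rw [hcntP]
        exact List.countP_eq_length.2 (fun m hm => decide_eq_true (hmem m hm))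
      exact_mod_cast this
  · rintro ⟨hmemL, hcnt⟩
    have hnat : L.count c = (g :: rest).length := by exact_mod_cast hcnt
    have hall : ∀ m ∈ g :: rest, c ∈ m.toList := by
      have h := List.countP_eq_length.1 (hcntP ▸ hnat)
      intro m hm; exact of_decide_eq_true (h m hm)
    exact ⟨hall g List.mem_cons_self, fun s hs => hall s (List.mem_cons_of_mem _ hs)⟩

theorem foldl_eq (data : List (List String)) (hpre : ∀ g ∈ data, g ≠ []) : ∀ acc : Int,
    data.foldl (fun count group =>
      count + PySem.Set.len
        ((PySem.List.pyRange 1 (group.length : Int) 1).foldl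
          (fun u idx => PySem.Set.inter u (PySem.Set.ofList (PySem.List.pyGetD group idx "").toList))
          (PySem.Set.ofList (PySem.List.pyGetD group 0 "").toList))) acc
    = data.foldl (fun total group =>
      total + (((group.foldl
          (fun d member =>
            (PySem.Set.ofList member.toList).foldl (fun d ch => d.modify ch 0 (· + 1)) d)
          PySem.Dict.empty).values.countP (fun v => v == ((group.length : Int))) : Nat) : Int)) acc := by
  induction data with
  | nil => intro acc; rfl
  | cons group rest ih =>
    intro acc
    obtain ⟨g, gr, rfl⟩ : ∃ g gr, group = g :: gr := by
      cases group with
      | nil => exact absurd rfl (hpre [] List.mem_cons_self)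
      | cons g gr => exact ⟨g, gr, rfl⟩
    have hc : PySem.Set.len
          ((PySem.List.pyRange 1 ((g :: gr).length : Int) 1).foldl
            (fun u idx => PySem.Set.inter u (PySem.Set.ofList (PySem.List.pyGetD (g :: gr) idx "").toList))
            (PySem.Set.ofList (PySem.List.pyGetD (g :: gr) 0 "").toList))
        = ((((g :: gr).foldl
              (fun d member =>
                (PySem.Set.ofList member.toList).foldl (fun d ch => d.modify ch 0 (· + 1)) d)
              PySem.Dict.empty).values.countP (fun v => v == (((g :: gr).length : Int))) : Nat) : Int) := by
      rw [freq_eq_counter]; exact group_contrib_eq g gr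
    simp only [List.foldl_cons] at hc ⊢
    rw [hc]
    exact ih (fun h hm => hpre h (List.mem_cons_of_mem _ hm)) _

theorem part_two_spec : Claim_equal_part_two := by
  intro data _ hpre
  unfold Spec_part_two part_two part_two_alt
  exact foldl_eq data hpre 0
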